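-- pv_equiv track=rewrite | github.com/rubelw/OSSS | src/OSSS/ai/agents/query_data/handlers/class_ranks_handler.py | _select_class_ranks_fields
-- ===== SOURCE A (Python) =====
-- from typing import Any, Dict, List, Sequence
--
-- def _select_class_ranks_fields(
--     rows: Sequence[Dict[str, Any]],
-- ) -> List[str]:
--     if not rows:
--         return []
--
--     preferred_order = [
--         "id",
--         "student_id",
--         "student_name",
--         "graduation_year",
--         "cohort",
--         "gpa",
--         "weighted_gpa",
--         "unweighted_gpa",
--         "class_rank",
--         "class_size",
--         "percentile",
--         "calculation_date",
--         "school_id",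
--         "school_name",
--         "created_at",
--         "updated_at",
--     ]
--
--     all_keys: List[str] = []
--     for r in rows:
--         for k in r.keys():
--             if k not in all_keys:
--                 all_keys.append(k)
--
--     ordered = [k for k in preferred_order if k in all_keys]
--     ordered.extend(k for k in all_keys if k not in ordered)
--     return ordered
-- ===== SOURCE B (Python) =====
-- from typing import Any, Dict, List, Sequence
--
-- def _select_class_ranks_fields(
--     rows: Sequence[Dict[str, Any]],
-- ) -> List[str]:
--     if not rows:
--         return []
--
--     preferred_order = [
--         "id",
--         "student_id",
--         "student_name",
--         "graduation_year",
--         "cohort",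
--         "gpa",
--         "weighted_gpa",
--         "unweighted_gpa",
--         "class_rank",
--         "class_size",
--         "percentile",
--         "calculation_date",
--         "school_id",
--         "school_name",
--         "created_at",
--         "updated_at",
--     ]
--     pref_set = set(preferred_order)
--
--     # Single pass: partition keys as we discover them.
--     found = set()          # preferred keys that occur in some row
--     extras = []            # non-preferred keys, first-seen order
--     extra_seen = set()
--     for r in rows:
--         for k in r.keys():
--             if k in pref_set:
--                 found.add(k)
--             elif k not in extra_seen:
--                 extra_seen.add(k)
--                 extras.append(k)
--
--     return [k for k in preferred_order if k in found] + extras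
-- ===== Notes on version B (the rewrite author's own statement) =====
-- stated objective: faster
-- what changed: Replaces A's collect-all-keys-then-reorder (with O(n) list membership scans and a second pass filtering/extending against growing lists) by a single pass that partitions keys into preferred-found and extras using hash sets.
import Mathlib
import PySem

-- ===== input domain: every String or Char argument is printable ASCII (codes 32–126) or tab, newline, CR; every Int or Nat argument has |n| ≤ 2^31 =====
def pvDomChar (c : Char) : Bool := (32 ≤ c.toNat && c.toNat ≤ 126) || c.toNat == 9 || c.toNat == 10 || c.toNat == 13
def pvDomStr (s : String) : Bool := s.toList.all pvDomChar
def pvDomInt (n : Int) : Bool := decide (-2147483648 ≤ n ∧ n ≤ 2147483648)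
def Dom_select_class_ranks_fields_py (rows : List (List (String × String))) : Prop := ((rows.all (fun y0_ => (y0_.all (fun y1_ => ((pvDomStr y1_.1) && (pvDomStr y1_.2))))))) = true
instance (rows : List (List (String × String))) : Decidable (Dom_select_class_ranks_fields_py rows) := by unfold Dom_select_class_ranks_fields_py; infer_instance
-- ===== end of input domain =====

-- B replaces A's collect-then-reorder (quadratic list scans) by one partitioning pass with sets.


-- the preferred_order literal, identical in both Pythons
def pvPreferredOrder : List String :=
  ["id", "student_id", "student_name", "graduation_year", "cohort", "gpa",
   "weighted_gpa", "unweighted_gpa", "class_rank", "class_size", "percentile",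
   "calculation_date", "school_id", "school_name", "created_at", "updated_at"]

-- ===== PORT A =====
def select_class_ranks_fields_py (rows : List (List (String × String))) : List String :=
  if rows = [] then []
  else
    -- all_keys accumulated with the 'if k not in all_keys: append' loop
    let allKeys : List String :=
      rows.foldl (fun acc r =>
        r.foldl (fun acc kv => if kv.1 ∈ acc then acc else acc ++ [kv.1]) acc) []
    let ordered : List String := pvPreferredOrder.filter (fun k => decide (k ∈ allKeys))
    -- ordered.extend(k for k in all_keys if k not in ordered): membership tested against the growing list
    allKeys.foldl (fun o k => if k ∈ o then o else o ++ [k]) ordered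

-- ===== PORT B =====
def select_class_ranks_fields_py_alt (rows : List (List (String × String))) : List String :=
  if rows = [] then []
  else
    let prefSet : PySem.Set String := PySem.Set.ofList pvPreferredOrder
    -- one pass: state = (found, extras, extra_seen)
    let st : PySem.Set String × List String × PySem.Set String :=
      rows.foldl (fun st r =>
        r.foldl (fun st kv =>
          if kv.1 ∈ prefSet then (PySem.Set.add st.1 kv.1, st.2.1, st.2.2)
          else if kv.1 ∈ st.2.2 then st
          else (st.1, st.2.1 ++ [kv.1], PySem.Set.add st.2.2 kv.1)) st)
        (PySem.Set.empty, [], PySem.Set.empty)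
    pvPreferredOrder.filter (fun k => decide (k ∈ st.1)) ++ st.2.1

-- ===== PRECONDITION & SPEC =====
def Spec_select_class_ranks_fields_py (rows : List (List (String × String))) (out : List String) : Prop := out = select_class_ranks_fields_py_alt rows
instance (rows : List (List (String × String))) (out : List String) : Decidable (Spec_select_class_ranks_fields_py rows out) := by unfold Spec_select_class_ranks_fields_py; infer_instance

-- ===== CLAIM (what is proved, stated in full; the proofs are below) =====
def Claim_equal_select_class_ranks_fields_py : Prop := ∀ (rows : List (List (String × String))), Dom_select_class_ranks_fields_py rows → Spec_select_class_ranks_fields_py rows (select_class_ranks_fields_py rows)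

-- ===== LEMMAS AND PROOFS =====

-- A's dedup-append step and its fold (dd's lambda is exactly port A's)
def dstep (a : List String) (k : String) : List String := if k ∈ a then a else a ++ [k]
def dd (acc : List String) (xs : List String) : List String :=
  xs.foldl (fun o k => if k ∈ o then o else o ++ [k]) acc

lemma dd_nil (acc : List String) : dd acc [] = acc := rfl
lemma dd_cons (acc : List String) (x : String) (xs : List String) :
    dd acc (x :: xs) = dd (dstep acc x) xs := rfl

lemma mem_dstep (acc : List String) (x k : String) : k ∈ dstep acc x ↔ k ∈ acc ∨ k = x := by
  unfold dstep
  by_cases h : x ∈ acc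
  · simp only [if_pos h]
    exact ⟨Or.inl, fun h' => h'.elim id (fun e => e ▸ h)⟩
  · simp [if_neg h]

lemma nodup_dstep (acc : List String) (x : String) (h : acc.Nodup) : (dstep acc x).Nodup := by
  unfold dstep
  by_cases hx : x ∈ acc
  · simpa [hx]
  · simp only [if_neg hx, List.nodup_append, List.nodup_singleton, true_and]
    refine ⟨h, ?_⟩
    simp only [List.mem_singleton]
    intro a ha b hb e
    exact hx ((hb ▸ e) ▸ ha)

lemma mem_dd (acc xs : List String) (k : String) : k ∈ dd acc xs ↔ k ∈ acc ∨ k ∈ xs := by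
  induction xs generalizing acc with
  | nil => simp [dd_nil]
  | cons x xs ih =>
    rw [dd_cons, ih, mem_dstep]
    simp only [List.mem_cons]
    tauto

lemma nodup_dd (acc xs : List String) (h : acc.Nodup) : (dd acc xs).Nodup := by
  induction xs generalizing acc with
  | nil => simpa [dd_nil]
  | cons x xs ih => rw [dd_cons]; exact ih _ (nodup_dstep acc x h)

lemma dd_eq_append_filter (acc xs : List String) (h : xs.Nodup) :
    dd acc xs = acc ++ xs.filter (fun k => decide (k ∉ acc)) := by
  induction xs generalizing acc with
  | nil => simp [dd_nil]
  | cons x xs ih =>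
    rcases List.nodup_cons.mp h with ⟨hx, hxs⟩
    rw [dd_cons]
    unfold dstep
    by_cases hm : x ∈ acc
    · simp only [if_pos hm]
      rw [ih _ hxs]
      simp [hm]
    · simp only [if_neg hm]
      rw [ih _ hxs]
      have hfe : xs.filter (fun k => decide (k ∉ acc ++ [x])) = xs.filter (fun k => decide (k ∉ acc)) := by
        apply List.filter_congr
        intro k hk
        have : k ≠ x := fun e => hx (e ▸ hk)
        simp [this]
      rw [hfe]
      simp [hm, List.append_assoc]

lemma filter_dstep_pos (p : String → Bool) (acc : List String) (x : String) (hp : p x = true) :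
    (dstep acc x).filter p = dstep (acc.filter p) x := by
  unfold dstep
  by_cases hm : x ∈ acc
  · have : x ∈ acc.filter p := List.mem_filter.mpr ⟨hm, hp⟩
    simp [hm, this]
  · have : x ∉ acc.filter p := fun hc => hm (List.mem_filter.mp hc).1
    simp [hm, this, List.filter_append, hp]

lemma filter_dstep_neg (p : String → Bool) (acc : List String) (x : String) (hp : p x = false) :
    (dstep acc x).filter p = acc.filter p := by
  unfold dstep
  by_cases hm : x ∈ acc
  · simp [hm]
  · simp [hm, List.filter_append, hp]

lemma filter_dd (p : String → Bool) (acc xs : List String) :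
    (dd acc xs).filter p = dd (acc.filter p) (xs.filter p) := by
  induction xs generalizing acc with
  | nil => simp [dd_nil]
  | cons x xs ih =>
    rw [dd_cons, ih, List.filter_cons]
    by_cases hp : p x
    · rw [filter_dstep_pos p acc x hp]
      simp only [hp, if_pos]
      rw [dd_cons]
    · rw [filter_dstep_neg p acc x (by simpa using hp)]
      simp [hp]

-- flatten port A's nested fold to dd over the flattened key list
lemma foldA (rows : List (List (String × String))) (init : List String) :
    rows.foldl (fun acc r =>
        r.foldl (fun acc kv => if kv.1 ∈ acc then acc else acc ++ [kv.1]) acc) init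
      = dd init (rows.flatMap (fun r => r.map Prod.fst)) := by
  induction rows generalizing init with
  | nil => rfl
  | cons r rows ih =>
    rw [List.foldl_cons, ih, List.flatMap_cons]
    unfold dd
    rw [List.foldl_append, List.foldl_map]

-- B's one-pass step, and flattening port B's nested fold to it
def tstep (st : PySem.Set String × List String × PySem.Set String) (k : String) :
    PySem.Set String × List String × PySem.Set String :=
  if k ∈ PySem.Set.ofList pvPreferredOrder then (PySem.Set.add st.1 k, st.2.1, st.2.2)
  else if k ∈ st.2.2 then st
  else (st.1, st.2.1 ++ [k], PySem.Set.add st.2.2 k)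

lemma foldB (rows : List (List (String × String)))
    (init : PySem.Set String × List String × PySem.Set String) :
    rows.foldl (fun st r =>
        r.foldl (fun st kv =>
          if kv.1 ∈ PySem.Set.ofList pvPreferredOrder then (PySem.Set.add st.1 kv.1, st.2.1, st.2.2)
          else if kv.1 ∈ st.2.2 then st
          else (st.1, st.2.1 ++ [kv.1], PySem.Set.add st.2.2 kv.1)) st) init
      = (rows.flatMap (fun r => r.map Prod.fst)).foldl tstep init := by
  induction rows generalizing init with
  | nil => rfl
  | cons r rows ih =>
    rw [List.foldl_cons, ih, List.flatMap_cons, List.foldl_append, List.foldl_map]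
    congr 1

def estep (e : List String) (k : String) : List String :=
  if k ∈ pvPreferredOrder then e else dstep e k

-- invariant of B's fold: extras follow estep, found collects the preferred keys seen
lemma trip (ks : List String) (f : PySem.Set String) (e : List String) (s : PySem.Set String)
    (hse : ∀ k, k ∈ s ↔ k ∈ e) :
    (ks.foldl tstep (f, e, s)).2.1 = ks.foldl estep e
      ∧ (∀ k, k ∈ (ks.foldl tstep (f, e, s)).1 ↔ k ∈ f ∨ (k ∈ ks ∧ k ∈ pvPreferredOrder)) := by
  induction ks generalizing f e s with
  | nil => exact ⟨rfl, fun k => by simp⟩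
  | cons x ks ih =>
    simp only [List.foldl_cons]
    by_cases hp : x ∈ pvPreferredOrder
    · have hx : tstep (f, e, s) x = (PySem.Set.add f x, e, s) := by
        unfold tstep; simp [PySem.Set.mem_ofList, hp]
      have he : estep e x = e := by unfold estep; simp [hp]
      rw [hx, he]
      obtain ⟨h1, h2⟩ := ih (PySem.Set.add f x) e s hse
      refine ⟨h1, fun k => ?_⟩
      rw [h2 k, PySem.Set.mem_add]
      simp only [List.mem_cons]
      by_cases hkx : k = x
      · subst hkx; tauto
      · tauto
    · have he : estep e x = dstep e x := by unfold estep; simp [hp]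
      by_cases hs : x ∈ s
      · have hx : tstep (f, e, s) x = (f, e, s) := by
          unfold tstep; simp [PySem.Set.mem_ofList, hp, hs]
        have hde : dstep e x = e := by unfold dstep; simp [(hse x).mp hs]
        rw [hx, he, hde]
        obtain ⟨h1, h2⟩ := ih f e s hse
        refine ⟨h1, fun k => ?_⟩
        rw [h2 k]
        simp only [List.mem_cons]
        by_cases hkx : k = x
        · subst hkx; tauto
        · tauto
      · have hxe : x ∉ e := fun h => hs ((hse x).mpr h)
        have hx : tstep (f, e, s) x = (f, e ++ [x], PySem.Set.add s x) := by
          unfold tstep; simp [PySem.Set.mem_ofList, hp, hs]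
        have hde : dstep e x = e ++ [x] := by unfold dstep; simp [hxe]
        rw [hx, he, hde]
        have hse' : ∀ k, k ∈ PySem.Set.add s x ↔ k ∈ e ++ [x] := by
          intro k; rw [PySem.Set.mem_add]; simp [hse k]
        obtain ⟨h1, h2⟩ := ih f (e ++ [x]) (PySem.Set.add s x) hse'
        refine ⟨h1, fun k => ?_⟩
        rw [h2 k]
        simp only [List.mem_cons]
        by_cases hkx : k = x
        · subst hkx; tauto
        · tauto

lemma foldl_estep (ks : List String) (e : List String) :
    ks.foldl estep e = dd e (ks.filter (fun k => decide (k ∉ pvPreferredOrder))) := by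
  induction ks generalizing e with
  | nil => simp [dd_nil]
  | cons x ks ih =>
    rw [List.foldl_cons]
    by_cases hp : x ∈ pvPreferredOrder
    · have hex : estep e x = e := by unfold estep; simp [hp]
      rw [hex, ih]
      congr 1
      simp [hp]
    · have hex : estep e x = dstep e x := by unfold estep; simp [hp]
      rw [hex, ih]
      have hfc : List.filter (fun k => decide (k ∉ pvPreferredOrder)) (x :: ks)
          = x :: List.filter (fun k => decide (k ∉ pvPreferredOrder)) ks := by
        simp [hp]
      rw [hfc, dd_cons]

-- ===== VERDICT (by name: the statement is the Claim_ definition above) =====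
theorem select_class_ranks_fields_py_spec : Claim_equal_select_class_ranks_fields_py := by
  intro rows _
  unfold Spec_select_class_ranks_fields_py select_class_ranks_fields_py select_class_ranks_fields_py_alt
  by_cases hr : rows = []
  · simp [hr]
  · simp only [if_neg hr]
    rw [foldA, foldB]
    set ks := rows.flatMap (fun r => r.map Prod.fst) with hks
    obtain ⟨h1, h2⟩ := trip ks PySem.Set.empty [] PySem.Set.empty (by simp [PySem.Set.empty])
    show dd (pvPreferredOrder.filter fun k => decide (k ∈ dd [] ks)) (dd [] ks)
        = (pvPreferredOrder.filter fun k =>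
            decide (k ∈ (ks.foldl tstep (PySem.Set.empty, [], PySem.Set.empty)).1))
          ++ (ks.foldl tstep (PySem.Set.empty, [], PySem.Set.empty)).2.1
    set all := dd [] ks with hall
    have hnd : all.Nodup := nodup_dd [] ks (by simp)
    have hmem : ∀ k, k ∈ all ↔ k ∈ ks := by intro k; rw [hall, mem_dd]; simp
    have hfirst : (pvPreferredOrder.filter fun k => decide (k ∈ all))
        = pvPreferredOrder.filter fun k =>
            decide (k ∈ (ks.foldl tstep (PySem.Set.empty, [], PySem.Set.empty)).1) := by
      apply List.filter_congr
      intro k hk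
      rw [decide_eq_decide, h2 k, hmem k]
      simp [PySem.Set.empty, hk]
    set ord := pvPreferredOrder.filter fun k => decide (k ∈ all) with hord
    have hsnd : all.filter (fun k => decide (k ∉ ord)) = all.filter (fun k => decide (k ∉ pvPreferredOrder)) := by
      apply List.filter_congr
      intro k hk
      rw [decide_eq_decide, hord]
      simp [List.mem_filter, hk]
    rw [dd_eq_append_filter ord all hnd, hsnd, hfirst, h1, foldl_estep]
    congr 1
    rw [hall, filter_dd]
    rfl
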